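-- pv_equiv track=rewrite | github.com/robespierreAlgo/alignfixV2 | backend/py/text.py | remove_nb_bl_pairs_stack
-- ===== SOURCE A (Python) =====
-- NO_BLANK_TOKEN = "#NB"
--
-- BLANK_TOKEN = "#BLANK"
--
-- def remove_nb_bl_pairs_stack(tokens):
--     stack = []
--
--     for t in tokens:
--         if stack and ((stack[-1], t) in [(NO_BLANK_TOKEN, BLANK_TOKEN), (BLANK_TOKEN, NO_BLANK_TOKEN)]):
--             stack.pop()  # remove previous NB/BL
--         else:
--             stack.append(t)
--
--     return stack
-- ===== SOURCE B (Python) =====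
-- NO_BLANK_TOKEN = "#NB"
--
-- BLANK_TOKEN = "#BLANK"
--
-- def remove_nb_bl_pairs_stack(tokens):
--     pairs = {(NO_BLANK_TOKEN, BLANK_TOKEN), (BLANK_TOKEN, NO_BLANK_TOKEN)}
--     toks = list(tokens)
--     while True:
--         for i in range(len(toks) - 1):
--             if (toks[i], toks[i + 1]) in pairs:
--                 del toks[i:i + 2]
--                 break
--         else:
--             return toks
-- ===== Notes on version B (the rewrite author's own statement) =====
-- stated objective: alternative
-- what changed: Replaces the one-pass stack with the naive rewriting strategy: repeatedly scan the list for the first adjacent NB/BLANK or BLANK/NB pair, delete both, and restart until no cancelling pair remains (equal by confluence of adjacent-pair cancellation).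
import Mathlib
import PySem

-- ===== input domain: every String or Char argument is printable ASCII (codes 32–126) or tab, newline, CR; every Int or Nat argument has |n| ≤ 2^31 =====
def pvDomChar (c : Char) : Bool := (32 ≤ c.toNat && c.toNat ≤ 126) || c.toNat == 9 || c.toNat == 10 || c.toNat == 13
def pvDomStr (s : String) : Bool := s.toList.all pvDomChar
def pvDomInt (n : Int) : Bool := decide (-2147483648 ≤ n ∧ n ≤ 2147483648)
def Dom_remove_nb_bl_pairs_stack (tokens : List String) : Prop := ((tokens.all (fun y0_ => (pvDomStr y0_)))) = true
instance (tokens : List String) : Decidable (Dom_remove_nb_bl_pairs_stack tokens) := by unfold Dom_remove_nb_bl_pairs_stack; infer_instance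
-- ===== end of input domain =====

-- B cancels adjacent NB/BLANK pairs by repeated first-pair deletion instead of A's one-pass stack; alternative decomposition, equal by confluence (proved below).

-- ===== PORT A =====
-- '(stack[-1], t) in [(NB, BL), (BL, NO)]' as a Boolean predicate
def pvCancel (x t : String) : Bool :=
  (x == "#NB" && t == "#BLANK") || (x == "#BLANK" && t == "#NB")

-- one loop iteration; the stack is kept top-first (head = Python's stack[-1]),
-- so pop = tail and append = cons; the returned stack is reversed back to Python order.
def pvStep (s : List String) (t : String) : List String :=
  match s with
  | [] => [t]
  | x :: xs => if pvCancel x t then xs else t :: x :: xs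

def remove_nb_bl_pairs_stack (tokens : List String) : List String :=
  (tokens.foldl pvStep []).reverse

-- ===== PORT B =====
-- scan for the first adjacent cancelling pair; delete both (the inner 'for … break')
def pvReduceOnce : List String → Option (List String)
  | a :: b :: rest =>
      if pvCancel a b then some rest
      else (pvReduceOnce (b :: rest)).map (a :: ·)
  | _ => none

-- length decreases by 2 at each successful deletion (used by the loop's termination)
theorem pvReduceOnce_length : ∀ {l l' : List String}, pvReduceOnce l = some l' → l'.length + 2 = l.length := by
  intro l
  induction l with
  | nil => intro l' h; simp [pvReduceOnce] at h
  | cons a rest ih =>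
    intro l' h
    match rest, h with
    | b :: rs, hh =>
      simp only [pvReduceOnce] at hh
      split at hh
      · cases hh; simp
      · simp only [Option.map_eq_some_iff] at hh
        obtain ⟨m, hm, rfl⟩ := hh
        have := ih (l' := m) hm
        simpa using this

-- the outer 'while True' loop: repeat until a full scan finds no pair
def pvReduceAll (l : List String) : List String :=
  match h : pvReduceOnce l with
  | some l' => pvReduceAll l'
  | none => l
termination_by l.length
decreasing_by have := pvReduceOnce_length h; omega

def remove_nb_bl_pairs_stack_alt (tokens : List String) : List String :=
  pvReduceAll tokens

-- ===== PRECONDITION & SPEC =====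
def Spec_remove_nb_bl_pairs_stack (tokens : List String) (out : List String) : Prop := out = remove_nb_bl_pairs_stack_alt tokens
instance (tokens : List String) (out : List String) : Decidable (Spec_remove_nb_bl_pairs_stack tokens out) := by unfold Spec_remove_nb_bl_pairs_stack; infer_instance

-- ===== CLAIM (what is proved, stated in full; the proofs are below) =====
def Claim_equal_remove_nb_bl_pairs_stack : Prop := ∀ (tokens : List String), Dom_remove_nb_bl_pairs_stack tokens → Spec_remove_nb_bl_pairs_stack tokens (remove_nb_bl_pairs_stack tokens)

-- ===== LEMMAS AND PROOFS =====

-- "no adjacent cancelling pair"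
def pvIrred (l : List String) : Prop := List.IsChain (fun a b => pvCancel a b = false) l

theorem pvCancel_symm (a b : String) : pvCancel a b = pvCancel b a := by
  simp only [pvCancel]
  rw [Bool.or_comm, Bool.and_comm (a == "#NB"), Bool.and_comm (a == "#BLANK")]

theorem pvCancel_det {x a b : String} (h1 : pvCancel x a = true) (h2 : pvCancel a b = true) : x = b := by
  simp only [pvCancel, Bool.or_eq_true, Bool.and_eq_true, beq_iff_eq] at h1 h2
  rcases h1 with ⟨hx, ha⟩ | ⟨hx, ha⟩ <;> rcases h2 with ⟨ha', hb⟩ | ⟨ha', hb⟩ <;>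
    simp_all

theorem pvStep_irred {s : List String} (t : String) (h : pvIrred s) : pvIrred (pvStep s t) := by
  match s with
  | [] => exact List.IsChain.singleton t
  | x :: xs =>
    simp only [pvStep]
    split
    · exact (List.isChain_cons.mp h).2
    · rename_i hc
      exact List.isChain_cons.mpr ⟨by intro y hy; simp at hy; subst hy; rw [pvCancel_symm]; simpa using hc, h⟩

theorem pvStep_step_cancel {s : List String} {a b : String} (hs : pvIrred s) (hc : pvCancel a b = true) :
    pvStep (pvStep s a) b = s := by
  match s with
  | [] => simp [pvStep, hc]
  | x :: xs =>
    simp only [pvStep]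
    by_cases hxa : pvCancel x a = true
    · simp only [hxa, if_true]
      have hxb : x = b := pvCancel_det hxa hc
      match xs with
      | [] => simp [hxb]
      | y :: ys =>
        have hxy : pvCancel x y = false := by
          have := (List.isChain_cons.mp hs).1 y (by simp)
          simpa using this
        have hyb : pvCancel y b = false := by rw [← hxb, pvCancel_symm]; exact hxy
        simp [hyb, hxb]
    · simp only [hxa]
      simp [hc]

-- deleting the first cancelling pair does not change the stack result
theorem pvFoldl_reduceOnce : ∀ {l l' : List String}, pvReduceOnce l = some l' →
    ∀ s : List String, pvIrred s → l.foldl pvStep s = l'.foldl pvStep s := by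
  intro l
  induction l with
  | nil => intro l' h; simp [pvReduceOnce] at h
  | cons a rest ih =>
    intro l' h s hs
    match rest, h with
    | b :: rs, h =>
      simp only [pvReduceOnce] at h
      split at h
      · rename_i hc
        cases h
        simp only [List.foldl_cons]
        rw [pvStep_step_cancel hs hc]
      · simp only [Option.map_eq_some_iff] at h
        obtain ⟨m, hm, rfl⟩ := h
        simp only [List.foldl_cons]
        have := ih (l' := m) hm (pvStep s a) (pvStep_irred a hs)
        simpa using this

-- a full scan with no pair found means the list is irreducible
theorem pvReduceOnce_none : ∀ {l : List String}, pvReduceOnce l = none → pvIrred l := by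
  intro l
  induction l with
  | nil => intro _; exact List.IsChain.nil
  | cons a rest ih =>
    intro h
    match rest with
    | [] => exact List.IsChain.singleton a
    | b :: rs =>
      simp only [pvReduceOnce] at h
      split at h
      · exact absurd h (by simp)
      · rename_i hc
        have hrest : pvReduceOnce (b :: rs) = none := by
          cases hh : pvReduceOnce (b :: rs) with
          | none => rfl
          | some m => rw [hh] at h; simp at h
        exact List.isChain_cons.mpr ⟨by intro y hy; simp at hy; subst hy; simpa using hc, ih hrest⟩

-- the stack never pops on an irreducible input
theorem pvFoldl_irred : ∀ {l : List String}, pvIrred l → ∀ s : List String,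
    (∀ x y, s.head? = some x → l.head? = some y → pvCancel x y = false) →
    l.foldl pvStep s = l.reverse ++ s := by
  intro l
  induction l with
  | nil => intro _ s _; simp
  | cons y rest ih =>
    intro hl s hhead
    have hstep : pvStep s y = y :: s := by
      match s with
      | [] => simp [pvStep]
      | x :: xs =>
        have := hhead x y rfl rfl
        simp [pvStep, this]
    simp only [List.foldl_cons, hstep]
    rw [ih (List.isChain_cons.mp hl).2 (y :: s) (by
      intro x z hx hz
      cases hx
      match rest, hz with
      | z :: rs, rfl =>
        have := (List.isChain_cons.mp hl).1 z (by simp)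
        simpa using this)]
    simp

theorem pvKey : ∀ l : List String, l.foldl pvStep [] = (pvReduceAll l).reverse := by
  intro l
  induction hn : l.length using Nat.strong_induction_on generalizing l with
  | _ n ih =>
    cases h : pvReduceOnce l with
    | none =>
      rw [pvReduceAll, h]
      have := pvFoldl_irred (pvReduceOnce_none h) [] (by intro x y hx; simp at hx)
      simpa using this
    | some l' =>
      rw [pvReduceAll, h]
      have hlen := pvReduceOnce_length h
      rw [pvFoldl_reduceOnce h [] List.IsChain.nil]
      exact ih l'.length (by omega) l' rfl

-- ===== VERDICT (by name: the statement is the Claim_ definition above) =====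
theorem remove_nb_bl_pairs_stack_spec : Claim_equal_remove_nb_bl_pairs_stack := by
  intro tokens _
  show remove_nb_bl_pairs_stack tokens = remove_nb_bl_pairs_stack_alt tokens
  unfold remove_nb_bl_pairs_stack remove_nb_bl_pairs_stack_alt
  rw [pvKey, List.reverse_reverse]
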